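-- pv_equiv track=rewrite | github.com/AdarshGupta-dev/Relevel-Coding-Questions | Divisibility-by-K.py | solve
-- ===== SOURCE A (Python) =====
-- def solve(arr, length, K):
--     # this is to check appearance of every possible remainders. Last True is just buffer.
--     remainders = [False] * K + [True]
--     for i in arr:
--         remainders[i % K] = True
--         if all(remainders):
--             break
--
--     # k is maximum possible iteration.
--     iterations = K
--     for i in range(1, K):
--         # we are moving a divider from 1 to k.
--         # pushing every left to zero, and right to k.
--         remainders_left = remainders[:i]
--         remainders_right = remainders[i:]
--
--         temp = 0
--         if True in remainders_left:
--             temp = len(remainders_left) - 1 - remainders_left[::-1].index(True)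
--         if True in remainders_right:
--             temp += K - i - remainders_right.index(True)
--         iterations = min(iterations, temp)
--
--     return iterations
-- ===== SOURCE B (Python) =====
-- def solve(arr, length, K):
--     # mark which remainder classes appear; stop once all K are seen
--     seen = [False] * K + [True]
--     remaining = K
--     for x in arr:
--         r = x % K
--         if not seen[r]:
--             seen[r] = True
--             remaining -= 1
--             if remaining == 0:
--                 break
--     # nxt[i] = smallest j >= i with seen[j] (buffer makes it K when none)
--     nxt = [K] * (K + 1)
--     for i in range(K - 1, 0, -1):
--         nxt[i] = i if seen[i] else nxt[i + 1]
--     # single pass: lastv = largest j < i with seen[j] (0 if none)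
--     best = K
--     lastv = 0
--     for i in range(1, K):
--         if seen[i - 1]:
--             lastv = i - 1
--         best = min(best, lastv + K - nxt[i])
--     return best
-- ===== Notes on version B (the rewrite author's own statement) =====
-- stated objective: faster
-- what changed: A rescans the remainder list for every divider position (a [:i]/[i:] slice with reverse-index and index searches per i, plus an all() scan after every marked element); B precomputes a suffix array 'first seen remainder >= i' in one backward pass and keeps a running 'last seen remainder < i' in a single forward pass, and replaces the per-element all() scan by a counter of still-missing remainders.
-- outside the precondition, e.g. on solve([0, 116, 1000000007], 1, -1000000): A returns -1000000, B raises IndexError; on solve([], 0, 0): A returns 0, B returns 0; on solve([5], 1, -1): A returns -1, B returns -1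
import Mathlib
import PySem

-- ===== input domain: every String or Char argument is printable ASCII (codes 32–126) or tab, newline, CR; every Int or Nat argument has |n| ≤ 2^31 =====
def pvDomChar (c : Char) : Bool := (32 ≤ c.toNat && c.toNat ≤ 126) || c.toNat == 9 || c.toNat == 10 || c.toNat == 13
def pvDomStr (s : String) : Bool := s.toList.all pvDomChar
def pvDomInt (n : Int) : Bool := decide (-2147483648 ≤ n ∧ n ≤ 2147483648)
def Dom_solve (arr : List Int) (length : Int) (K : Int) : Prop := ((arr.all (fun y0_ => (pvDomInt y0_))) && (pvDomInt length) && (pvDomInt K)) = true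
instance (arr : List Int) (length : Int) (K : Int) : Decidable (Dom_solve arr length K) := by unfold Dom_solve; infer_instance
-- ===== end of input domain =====

-- B replaces A's per-divider slicing (O(K) work for each of the K divider positions, plus an
-- all() scan per marked element) by a precomputed suffix array of "first seen remainder ≥ i"
-- and a running "last seen remainder < i", one O(K) pass in total: O(n + K) instead of O(n·K + K²).

-- ===== PORT A =====
-- first loop of A: mark remainders, break as soon as all entries are True
def solveMark (K : Int) : List Int → List Bool → List Bool
  | [], rs => rs
  | x :: t, rs =>
    let rs' := PySem.List.pySetD rs (PySem.Int.mod x K) true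
    if rs'.all (fun b => b) then rs' else solveMark K t rs'

def solve (arr : List Int) (length : Int) (K : Int) : Int :=
  let rs := solveMark K arr (List.replicate K.toNat false ++ [true])
  (PySem.List.pyRange 1 K 1).foldl (fun iterations i =>
    let rl := PySem.List.slice rs none (some i)
    let rr := PySem.List.slice rs (some i) none
    -- remainders_left[::-1] is rl.reverse (PySem.List.slice?_none_none_neg_one);
    -- the `.index(True)` calls are guarded by the `in` tests, so `.getD 0` is never the raising case
    let t0 : Int := if rl.contains true then (rl.length : Int) - 1 - ((PySem.List.index? rl.reverse true).getD 0 : Nat) else 0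
    let t1 : Int := if rr.contains true then t0 + K - i - ((PySem.List.index? rr true).getD 0 : Nat) else t0
    min iterations t1) K

-- ===== PORT B =====
-- first loop of B: mark remainders, count how many distinct ones are still missing
def altMark (K : Int) : List Int → List Bool → Int → List Bool × Int
  | [], seen, remaining => (seen, remaining)
  | x :: t, seen, remaining =>
    let r := PySem.Int.mod x K
    if PySem.List.pyGetD seen r false = false then
      let seen' := PySem.List.pySetD seen r true
      let remaining' := remaining - 1
      if remaining' = 0 then (seen', remaining') else altMark K t seen' remaining'
    else altMark K t seen remaining

def solve_alt (arr : List Int) (length : Int) (K : Int) : Int :=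
  let seen := (altMark K arr (List.replicate K.toNat false ++ [true]) K).1
  let nxt := (PySem.List.pyRange (K - 1) 0 (-1)).foldl
    (fun nxt i => PySem.List.pySetD nxt i (if PySem.List.pyGetD seen i false then i else PySem.List.pyGetD nxt (i + 1) 0))
    (List.replicate (K.toNat + 1) K)
  ((PySem.List.pyRange 1 K 1).foldl
    (fun (bl : Int × Int) i =>
      let lastv := if PySem.List.pyGetD seen (i - 1) false then i - 1 else bl.2
      (min bl.1 (lastv + K - PySem.List.pyGetD nxt i 0), lastv))
    (K, 0)).1

-- ===== PRECONDITION & SPEC =====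
-- Pre_ restricts to the natural domain K ≥ 1 (K is the number of remainder classes): for K = 0 A raises
-- ZeroDivisionError on any nonempty arr, and for K < 0 both programs index a degenerate one-element buffer
-- list and mostly raise IndexError; on some K < 0 inputs A's all()-break accidentally returns K where B's
-- counting loop still raises, and where both happen to return they agree.
def Pre_solve (arr : List Int) (length : Int) (K : Int) : Prop := 1 ≤ K
instance (arr : List Int) (length : Int) (K : Int) : Decidable (Pre_solve arr length K) := by unfold Pre_solve; infer_instance
def pvWitness_solve : List Int × Int × Int := ([3, 5, 11], 3, 4)

def Spec_solve (arr : List Int) (length : Int) (K : Int) (out : Int) : Prop := out = solve_alt arr length K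
instance (arr : List Int) (length : Int) (K : Int) (out : Int) : Decidable (Spec_solve arr length K out) := by unfold Spec_solve; infer_instance

-- ===== CLAIM (what is proved, stated in full; the proofs are below) =====
def Claim_equal_solve : Prop := ∀ (arr : List Int) (length : Int) (K : Int), Dom_solve arr length K → Pre_solve arr length K → Spec_solve arr length K (solve arr length K)


-- ===== LEMMAS AND PROOFS =====

-- the common marking step both first loops perform
def pvMark (K : Int) (rs : List Bool) (x : Int) : List Bool :=
  PySem.List.pySetD rs (PySem.Int.mod x K) true

theorem pv_getD_set_self {a : Type} (xs : List a) (m : Nat) (v d : a) (h : m < xs.length) :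
    (xs.set m v).getD m d = v := by
  simp [List.getD_eq_getElem?_getD, h]

theorem pv_getD_set_ne {a : Type} (xs : List a) (m i : Nat) (v d : a) (h : m ≠ i) :
    (xs.set m v).getD i d = xs.getD i d := by
  simp [List.getD_eq_getElem?_getD, h]

theorem pv_set_true_of_not_false (rs : List Bool) (m : Nat) (h : false ∉ rs) :
    rs.set m true = rs := by
  induction rs generalizing m with
  | nil => rfl
  | cons b t ih =>
    simp only [List.mem_cons, not_or] at h
    cases m with
    | zero =>
      cases b with
      | false => exact absurd rfl h.1
      | true => rfl
    | succ m => simp [List.set_cons_succ, ih m h.2]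

theorem pv_set_true_getD_true (rs : List Bool) (m : Nat) (h : rs.getD m false = true) :
    rs.set m true = rs := by
  induction rs generalizing m with
  | nil => rfl
  | cons b t ih =>
    cases m with
    | zero => simp_all
    | succ m => simpa using ih m (by simpa using h)

theorem pv_count_false_set (xs : List Bool) (m : Nat) (hm : m < xs.length) (hx : xs[m] = false) :
    (xs.set m true).count false + 1 = xs.count false := by
  induction xs generalizing m with
  | nil => simp at hm
  | cons b t ih =>
    cases m with
    | zero => simp_all
    | succ m =>
      simp only [List.getElem_cons_succ] at hx
      simp only [List.set_cons_succ, List.count_cons]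
      have := ih m (by simpa using hm) hx
      omega

theorem pv_foldl_mark_of_not_false (K : Int) (hK : 1 <= K) (l : List Int) (rs : List Bool)
    (h : false ∉ rs) : l.foldl (pvMark K) rs = rs := by
  induction l with
  | nil => rfl
  | cons x t ih =>
    have hr : 0 ≤ PySem.Int.mod x K := PySem.Int.mod_nonneg x (by omega)
    have hstep : pvMark K rs x = rs := by
      rw [pvMark, PySem.List.pySetD_of_nonneg _ _ hr, pv_set_true_of_not_false _ _ h]
    rw [List.foldl_cons, hstep, ih]

theorem pv_solveMark_eq (K : Int) (hK : 1 <= K) :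
    ∀ (l : List Int) (rs : List Bool), solveMark K l rs = l.foldl (pvMark K) rs := by
  intro l
  induction l with
  | nil => intro rs; rfl
  | cons x t ih =>
    intro rs
    rw [solveMark, List.foldl_cons]
    by_cases hall : (PySem.List.pySetD rs (PySem.Int.mod x K) true).all (fun b => b) = true
    · rw [if_pos hall]
      have hnf : false ∉ PySem.List.pySetD rs (PySem.Int.mod x K) true := by
        intro hmem
        have := (List.all_eq_true.mp hall) false hmem
        simp at this
      exact (pv_foldl_mark_of_not_false K hK t _ hnf).symm
    · rw [if_neg hall, ih]
      rfl

theorem pv_altMark_eq (K : Int) (hK : 1 <= K) :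
    ∀ (l : List Int) (seen : List Bool) (rem : Int), seen.length = K.toNat + 1 →
    rem = (seen.count false : Int) →
    (altMark K l seen rem).1 = l.foldl (pvMark K) seen := by
  intro l
  induction l with
  | nil => intro seen rem _ _; rfl
  | cons x t ih =>
    intro seen rem hlen hrem
    have hr0 : 0 ≤ PySem.Int.mod x K := PySem.Int.mod_nonneg x (by omega)
    have hrK : PySem.Int.mod x K < K := PySem.Int.mod_lt x (by omega)
    have hrn : (PySem.Int.mod x K).toNat < seen.length := by omega
    have hget : PySem.List.pyGetD seen (PySem.Int.mod x K) false
        = seen[(PySem.Int.mod x K).toNat] :=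
      PySem.List.pyGetD_eq_getElem seen false hr0 (by omega)
    rw [altMark, hget, List.foldl_cons]
    have hstep : pvMark K seen x = seen.set (PySem.Int.mod x K).toNat true := by
      rw [pvMark, PySem.List.pySetD_of_nonneg _ _ hr0]
    by_cases hfalse : seen[(PySem.Int.mod x K).toNat] = false
    · rw [if_pos (by simp [hfalse])]
      have hcnt : (seen.set (PySem.Int.mod x K).toNat true).count false + 1
          = seen.count false := pv_count_false_set seen _ hrn hfalse
      rw [PySem.List.pySetD_of_nonneg _ _ hr0]
      by_cases hz : rem - 1 = 0
      · rw [if_pos hz]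
        have hnf : false ∉ seen.set (PySem.Int.mod x K).toNat true := by
          rw [← List.count_eq_zero]
          omega
        rw [hstep, pv_foldl_mark_of_not_false K hK t _ hnf]
      · rw [if_neg hz]
        rw [hstep] at *
        exact ih _ (rem - 1) (by simp [hlen]) (by omega)
    · rw [if_neg (by simp [hfalse])]
      have hTrue : seen[(PySem.Int.mod x K).toNat] = true := by
        cases h : seen[(PySem.Int.mod x K).toNat] <;> simp_all
      have hseen : pvMark K seen x = seen := by
        rw [hstep]
        exact pv_set_true_getD_true seen _ (by rw [List.getD_eq_getElem seen false hrn, hTrue])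
      rw [hseen]
      exact ih seen rem hlen hrem

theorem pv_foldl_mark_length (K : Int) (l : List Int) (rs : List Bool) :
    (l.foldl (pvMark K) rs).length = rs.length := by
  induction l generalizing rs with
  | nil => rfl
  | cons x t ih => rw [List.foldl_cons, ih, pvMark, PySem.List.length_pySetD]

theorem pv_foldl_mark_getD_true (K : Int) (hK : 1 <= K) (l : List Int) (rs : List Bool) (i : Nat)
    (h : rs.getD i false = true) : (l.foldl (pvMark K) rs).getD i false = true := by
  induction l generalizing rs with
  | nil => exact h
  | cons x t ih =>
    rw [List.foldl_cons]
    apply ih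
    have hr : 0 ≤ PySem.Int.mod x K := PySem.Int.mod_nonneg x (by omega)
    rw [pvMark, PySem.List.pySetD_of_nonneg _ _ hr]
    rcases eq_or_ne (PySem.Int.mod x K).toNat i with he | hne
    · subst he
      have hlt : (PySem.Int.mod x K).toNat < rs.length := by
        by_contra hge
        rw [List.getD_eq_default _ _ (by omega)] at h
        simp at h
      rw [pv_getD_set_self _ _ _ _ hlt]
    · rw [pv_getD_set_ne _ _ _ _ _ hne]
      exact h

-- "last remainder seen strictly below i, else 0": A's left-slice value, B's running value
def lastSpec (R : List Bool) : Nat → Int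
  | 0 => 0
  | i+1 => if R.getD i false then (i : Int) else lastSpec R i

-- "first remainder seen at or above i (counting the buffer at n)": A's right-slice value, B's array
def nxtSpec (R : List Bool) (n : Nat) (i : Nat) : Int :=
  if _h : i < n then (if R.getD i false then (i : Int) else nxtSpec R n (i+1)) else (n : Int)
termination_by n - i

theorem pv_left_eq (R : List Bool) (m : Nat) (hm : m <= R.length) :
    (if (R.take m).contains true then
        ((R.take m).length : Int) - 1 - (((PySem.List.index? (R.take m).reverse true).getD 0 : Nat) : Int)
      else 0) = lastSpec R m := by
  induction m with
  | zero => simp [lastSpec]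
  | succ m ih =>
    have hm' : m < R.length := by omega
    have htake : R.take (m + 1) = R.take m ++ [R[m]] := by
      rw [List.take_add_one]
      simp [List.getElem?_eq_getElem hm']
    have hlen_take : (R.take m).length = m := List.length_take_of_le (by omega)
    have hgd : R.getD m false = R[m] := List.getD_eq_getElem R false hm'
    rw [htake, lastSpec, hgd]
    cases hRm : R[m] with
    | true =>
      rw [if_pos rfl]
      have hcontains : (R.take m ++ [true]).contains true = true := by
        simp
      rw [if_pos hcontains, List.reverse_append, List.reverse_singleton]
      simp only [List.singleton_append, PySem.List.index?_cons_self, Option.getD_some]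
      simp [hlen_take]
    | false =>
      have ihm := ih (by omega)
      have hrhs : (if false = true then ((m : Nat) : Int) else lastSpec R m) = lastSpec R m := by
        simp
      rw [hrhs]
      have hrev : (R.take m ++ [false]).reverse = false :: (R.take m).reverse := by
        simp
      rw [hrev, PySem.List.index?_cons_of_ne _ (by simp)]
      have hcon : (R.take m ++ [false]).contains true = (R.take m).contains true := by
        simp
      rw [hcon]
      by_cases hc : (R.take m).contains true = true
      · rw [if_pos hc]
        rw [if_pos hc] at ihm
        have hmem : true ∈ (R.take m).reverse := by
          rw [List.mem_reverse]
          exact List.contains_iff_mem.mp hc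
        obtain ⟨k, hk⟩ := Option.isSome_iff_exists.mp
          ((PySem.List.index?_isSome_iff _ _).mpr hmem)
        rw [hk] at ihm
        rw [hk]
        simp only [Option.map_some, Option.getD_some] at ihm ⊢
        rw [← ihm]
        simp only [List.length_append, hlen_take, List.length_cons, List.length_nil]
        push_cast
        omega
      · rw [if_neg hc]
        rw [if_neg hc] at ihm
        exact ihm

theorem pv_right_index (R : List Bool) (n : Nat) (hlen : R.length = n + 1)
    (hlast : R.getD n false = true) : ∀ (m : Nat), m <= n →
    ∃ j : Nat, PySem.List.index? (R.drop m) true = some j ∧ (j : Int) = nxtSpec R n m - m := by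
  have main : ∀ (k m : Nat), n - m = k → m <= n →
      ∃ j : Nat, PySem.List.index? (R.drop m) true = some j ∧ (j : Int) = nxtSpec R n m - m := by
    intro k
    induction k with
    | zero =>
      intro m hk hm
      have hmn : m = n := by omega
      subst hmn
      have hRn : R[m] = true := by
        rw [← List.getD_eq_getElem R false (by omega)]
        exact hlast
      have hdrop : R.drop m = [true] := by
        rw [List.drop_eq_getElem_cons (by omega : m < R.length), hRn,
          List.drop_eq_nil_of_le (by omega)]
      refine ⟨0, ?_, ?_⟩
      · rw [hdrop]; exact PySem.List.index?_cons_self true []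
      · rw [nxtSpec]
        simp
    | succ k ihk =>
      intro m hk hm
      have hmn : m < n := by omega
      have hgd : R.getD m false = R[m] := List.getD_eq_getElem R false (by omega)
      have hdrop : R.drop m = R[m] :: R.drop (m + 1) :=
        List.drop_eq_getElem_cons (by omega)
      cases hRm : R[m] with
      | true =>
        refine ⟨0, ?_, ?_⟩
        · rw [hdrop, hRm]; exact PySem.List.index?_cons_self true _
        · rw [nxtSpec, dif_pos hmn, hgd, hRm, if_pos rfl]
          simp
      | false =>
        obtain ⟨j, hj, hjv⟩ := ihk (m + 1) (by omega) (by omega)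
        refine ⟨j + 1, ?_, ?_⟩
        · rw [hdrop, hRm, PySem.List.index?_cons_of_ne _ (by simp), hj]
          rfl
        · rw [nxtSpec, dif_pos hmn, hgd, hRm, if_neg (by simp)]
          push_cast
          omega
  intro m hm
  exact main (n - m) m rfl hm

theorem pv_nxt_loop (R : List Bool) (K : Int) (n : Nat) (hn : (n : Int) = K)
    (hlen : R.length = n + 1) :
    ∀ (m : Nat) (acc : List Int), 1 <= m → m <= n → acc.length = n + 1 →
    (∀ j : Nat, m <= j → j <= n → acc.getD j 0 = nxtSpec R n j) →
    ∀ j : Nat, 1 <= j → j <= n →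
    ((PySem.List.pyRange ((m : Int) - 1) 0 (-1)).foldl
        (fun nxt i => PySem.List.pySetD nxt i
          (if PySem.List.pyGetD R i false then i else PySem.List.pyGetD nxt (i + 1) 0)) acc).getD j 0
      = nxtSpec R n j := by
  intro m
  induction m with
  | zero => intro acc h1 _ _ _; exact absurd h1 (by omega)
  | succ m ihm =>
    intro acc h1 hm hlenacc hacc j hj1 hjn
    by_cases hm0 : m = 0
    · subst hm0
      rw [show (((1:Nat) : Int) - 1) = 0 by norm_num,
        PySem.List.pyRange_neg_one_eq_nil (by omega)]
      exact hacc j (by omega) hjn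
    · have hm1 : 1 <= m := by omega
      rw [show (((m+1:Nat) : Int) - 1) = ((m:Nat) : Int) by push_cast; ring]
      rw [PySem.List.pyRange_neg_one_cons (by exact_mod_cast Nat.pos_of_ne_zero hm0),
        List.foldl_cons]
      have hvval : (if PySem.List.pyGetD R ((m:Nat):Int) false then ((m:Nat):Int)
          else PySem.List.pyGetD acc (((m:Nat):Int) + 1) 0) = nxtSpec R n m := by
        rw [PySem.List.pyGetD_natCast,
          show (((m:Nat):Int) + 1) = (((m+1:Nat)):Int) by push_cast; ring,
          PySem.List.pyGetD_natCast, hacc (m+1) (by omega) (by omega)]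
        conv_rhs => rw [nxtSpec]
        rw [dif_pos (show m < n by omega)]
      rw [show (PySem.List.pySetD acc ((m:Nat):Int)
            (if PySem.List.pyGetD R ((m:Nat):Int) false then ((m:Nat):Int)
              else PySem.List.pyGetD acc (((m:Nat):Int) + 1) 0))
          = acc.set m (nxtSpec R n m) by rw [← hvval, PySem.List.pySetD_natCast]]
      apply ihm (acc.set m (nxtSpec R n m)) hm1 (by omega) (by simp [hlenacc]) ?_ j hj1 hjn
      intro j' hj'm hj'n
      rcases eq_or_ne m j' with he | hne
      · subst he
        rw [pv_getD_set_self _ _ _ _ (by omega)]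
      · rw [pv_getD_set_ne _ _ _ _ _ hne]
        exact hacc j' (by omega) hj'n

theorem pv_main_loop (R : List Bool) (K : Int) (n : Nat) (hn : (n : Int) = K)
    (hlen : R.length = n + 1) (hlast : R.getD n false = true)
    (nxt : List Int) (hnxt : ∀ j : Nat, 1 <= j → j <= n → nxt.getD j 0 = nxtSpec R n j) :
    ∀ (m : Nat) (acc lastv : Int), 1 <= m → m <= n → lastv = lastSpec R (m - 1) →
    (PySem.List.pyRange (m : Int) K 1).foldl (fun iterations i =>
        let rl := PySem.List.slice R none (some i)
        let rr := PySem.List.slice R (some i) none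
        let t0 : Int := if rl.contains true then (rl.length : Int) - 1 - (((PySem.List.index? rl.reverse true).getD 0 : Nat) : Int) else 0
        let t1 : Int := if rr.contains true then t0 + K - i - (((PySem.List.index? rr true).getD 0 : Nat) : Int) else t0
        min iterations t1) acc
      = ((PySem.List.pyRange (m : Int) K 1).foldl (fun (bl : Int × Int) i =>
          let lastv := if PySem.List.pyGetD R (i - 1) false then i - 1 else bl.2
          (min bl.1 (lastv + K - PySem.List.pyGetD nxt i 0), lastv)) (acc, lastv)).1 := by
  have main : ∀ (k m : Nat) (acc lastv : Int), n - m = k → 1 <= m → m <= n →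
      lastv = lastSpec R (m - 1) →
      (PySem.List.pyRange (m : Int) K 1).foldl (fun iterations i =>
          let rl := PySem.List.slice R none (some i)
          let rr := PySem.List.slice R (some i) none
          let t0 : Int := if rl.contains true then (rl.length : Int) - 1 - (((PySem.List.index? rl.reverse true).getD 0 : Nat) : Int) else 0
          let t1 : Int := if rr.contains true then t0 + K - i - (((PySem.List.index? rr true).getD 0 : Nat) : Int) else t0
          min iterations t1) acc
        = ((PySem.List.pyRange (m : Int) K 1).foldl (fun (bl : Int × Int) i =>
            let lastv := if PySem.List.pyGetD R (i - 1) false then i - 1 else bl.2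
            (min bl.1 (lastv + K - PySem.List.pyGetD nxt i 0), lastv)) (acc, lastv)).1 := by
    intro k
    induction k with
    | zero =>
      intro m acc lastv hk h1 hm hl
      have hmn : m = n := by omega
      subst hmn
      rw [PySem.List.pyRange_one_eq_nil (by omega)]
      rfl
    | succ k ihk =>
      intro m acc lastv hk h1 hm hl
      have hmn : m < n := by omega
      rw [PySem.List.pyRange_one_cons (show ((m:Nat):Int) < K by omega), List.foldl_cons,
        List.foldl_cons]
      dsimp only
      have h0m : (0:Int) ≤ ((m:Nat):Int) := by positivity
      have hslice_l : PySem.List.slice R none (some ((m:Nat):Int)) = R.take m := by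
        rw [PySem.List.slice_to R h0m]
        simp
      have hslice_r : PySem.List.slice R (some ((m:Nat):Int)) none = R.drop m := by
        rw [PySem.List.slice_from R h0m]
        simp
      obtain ⟨j, hj, hjv⟩ := pv_right_index R n hlen hlast m (by omega)
      have hcon_r : (R.drop m).contains true = true := by
        rw [List.contains_iff_mem]
        exact (PySem.List.index?_isSome_iff _ _).mp (by rw [hj]; rfl)
      have hA := pv_left_eq R m (by omega)
      rw [hslice_l, hslice_r, hA, if_pos hcon_r, hj]
      simp only [Option.getD_some]
      rw [show lastSpec R m + K - ((m:Nat):Int) - (j:Int)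
          = lastSpec R m + K - nxtSpec R n m by omega]
      have hlv : (if PySem.List.pyGetD R (((m:Nat):Int) - 1) false then ((m:Nat):Int) - 1 else lastv)
          = lastSpec R m := by
        rw [show (((m:Nat):Int) - 1) = (((m-1:Nat)):Int) by omega,
          PySem.List.pyGetD_natCast, hl]
        obtain ⟨p, hp⟩ : ∃ p, m = p + 1 := ⟨m - 1, by omega⟩
        subst hp
        simp only [Nat.add_sub_cancel]
        rw [lastSpec]
      have hnxtm : PySem.List.pyGetD nxt ((m:Nat):Int) 0 = nxtSpec R n m := by
        rw [PySem.List.pyGetD_natCast]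
        exact hnxt m h1 (by omega)
      rw [hlv, hnxtm]
      rw [show (((m:Nat):Int) + 1) = (((m+1:Nat)):Int) by push_cast; ring]
      exact ihk (m+1) _ _ (by omega) (by omega) (by omega) (by norm_num)
  intro m acc lastv h1 hm hl
  exact main (n - m) m acc lastv rfl h1 hm hl


-- ===== VERDICT (by name: the statement is the Claim_ definition above) =====
theorem solve_spec : Claim_equal_solve := by
  unfold Claim_equal_solve
  intro arr length K _ hK
  have hK1 : (1 : Int) ≤ K := hK
  unfold Spec_solve solve solve_alt
  have hn : ((K.toNat : Nat) : Int) = K := Int.toNat_of_nonneg (by omega)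
  set n := K.toNat with hndef
  have hn1 : 1 ≤ n := by omega
  have hlen0 : (List.replicate n false ++ [true]).length = n + 1 := by simp
  rw [pv_solveMark_eq K hK1]
  rw [pv_altMark_eq K hK1 arr _ K hlen0
    (by simp [List.count_append]; omega)]
  set R := arr.foldl (pvMark K) (List.replicate n false ++ [true]) with hR
  have hlenR : R.length = n + 1 := by
    rw [hR, pv_foldl_mark_length]
    exact hlen0
  have hlastR : R.getD n false = true := by
    rw [hR]
    apply pv_foldl_mark_getD_true K hK1
    rw [List.getD_eq_getElem _ _ (by simp),
      List.getElem_append_right (by simp)]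
    simp
  have hinit : ∀ j : Nat, n ≤ j → j ≤ n → (List.replicate (n+1) K).getD j 0 = nxtSpec R n j := by
    intro j hj1 hj2
    have hj : j = n := by omega
    subst hj
    rw [List.getD_replicate _ (by omega), nxtSpec, dif_neg (lt_irrefl n)]
    exact hn.symm
  have hnxt := pv_nxt_loop R K n hn hlenR n (List.replicate (n+1) K) hn1 le_rfl (by simp) hinit
  rw [show (K - 1) = ((n : Nat) : Int) - 1 by omega]
  have hmain := pv_main_loop R K n hn hlenR hlastR _ hnxt 1 K 0 le_rfl hn1 rfl
  simpa using hmain
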